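-- pv_equiv track=rewrite | github.com/hyungmogu/algorithm-and-data-structure-exercises | interview_cake/greedy/highest_product_of_3_video_practice_01.py | getLowestOfTwoProduct
-- ===== SOURCE A (Python) =====
-- import functools
--
-- def getLowestOfTwoProduct(list_of_ints):
--     lowest_of_two_list = [None, None]
--
--     for element in list_of_ints:
--         if lowest_of_two_list[1] is None or lowest_of_two_list[1] > element:
--             lowest_of_two_list[0] = lowest_of_two_list[1]
--             lowest_of_two_list[1] = element
--             continue
--
--         if lowest_of_two_list[0] is None or lowest_of_two_list[0] > element:
--             lowest_of_two_list[0] = element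
--
--     return functools.reduce(lambda x,y: x * y, lowest_of_two_list)
-- ===== SOURCE B (Python) =====
-- def getLowestOfTwoProduct(list_of_ints):
--     s = sorted(list_of_ints)
--     return s[0] * s[1]
-- ===== Notes on version B (the rewrite author's own statement) =====
-- stated objective: simpler
-- what changed: Replaces A's single-pass two-minima tracking with None sentinels by sort-then-take: sort the list and return the product of its first two elements.
import Mathlib
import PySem

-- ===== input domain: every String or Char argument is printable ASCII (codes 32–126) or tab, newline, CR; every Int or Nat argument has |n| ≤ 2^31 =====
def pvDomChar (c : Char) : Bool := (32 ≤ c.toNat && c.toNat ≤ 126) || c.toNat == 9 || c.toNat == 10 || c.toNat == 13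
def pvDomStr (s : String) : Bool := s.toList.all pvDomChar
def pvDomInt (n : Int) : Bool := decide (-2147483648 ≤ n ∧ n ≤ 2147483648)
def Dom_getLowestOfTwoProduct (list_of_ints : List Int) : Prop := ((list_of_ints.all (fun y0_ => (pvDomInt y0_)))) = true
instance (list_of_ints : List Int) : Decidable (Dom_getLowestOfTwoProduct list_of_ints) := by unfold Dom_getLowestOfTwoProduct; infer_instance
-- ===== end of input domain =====

-- B replaces A's single-pass two-minima tracking with sort-then-take-the-first-two (simpler).

-- ===== PORT A =====
-- One loop iteration of A: state is (lowest_of_two_list[0], lowest_of_two_list[1]), None = none.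
def pvAStep (st : Option Int × Option Int) (e : Int) : Option Int × Option Int :=
  match st.2 with
  | none => (st.2, some e)                  -- slot1 is None: shift, slot1 = e
  | some m =>
    if m > e then (st.2, some e)            -- slot1 > e: shift, slot1 = e
    else
      match st.1 with
      | none => (some e, st.2)              -- slot0 is None: slot0 = e
      | some s => if s > e then (some e, st.2) else st

def getLowestOfTwoProduct (list_of_ints : List Int) : Int :=
  let st := list_of_ints.foldl pvAStep ((none : Option Int), (none : Option Int))
  -- functools.reduce(lambda x,y: x*y, [slot0, slot1]); Python raises TypeError when a slot
  -- is still None (fewer than two elements) — excluded by Pre_; 0 is a junk value there.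
  match st.1, st.2 with
  | some x, some y => x * y
  | _, _ => 0

-- ===== PORT B =====
def getLowestOfTwoProduct_alt (list_of_ints : List Int) : Int :=
  let s := PySem.List.sorted list_of_ints (fun x => x) false
  -- s[0] * s[1]; Python raises IndexError when len < 2 — excluded by Pre_; 0 is a junk value.
  (PySem.List.pyGet? s 0).getD 0 * (PySem.List.pyGet? s 1).getD 0

-- ===== PRECONDITION & SPEC =====
-- On lists with fewer than two elements A raises TypeError (None * int in reduce) and B raises IndexError.
def Pre_getLowestOfTwoProduct (list_of_ints : List Int) : Prop := 2 ≤ list_of_ints.length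
instance (list_of_ints : List Int) : Decidable (Pre_getLowestOfTwoProduct list_of_ints) := by
  unfold Pre_getLowestOfTwoProduct; infer_instance

def pvWitness_getLowestOfTwoProduct : List Int := [3, -1, 4, -1]

def Spec_getLowestOfTwoProduct (list_of_ints : List Int) (out : Int) : Prop := out = getLowestOfTwoProduct_alt list_of_ints
instance (list_of_ints : List Int) (out : Int) : Decidable (Spec_getLowestOfTwoProduct list_of_ints out) := by unfold Spec_getLowestOfTwoProduct; infer_instance

-- ===== CLAIM (what is proved, stated in full; the proofs are below) =====
def Claim_equal_getLowestOfTwoProduct : Prop := ∀ (list_of_ints : List Int), Dom_getLowestOfTwoProduct list_of_ints → Pre_getLowestOfTwoProduct list_of_ints → Spec_getLowestOfTwoProduct list_of_ints (getLowestOfTwoProduct list_of_ints)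

-- ===== LEMMAS AND PROOFS =====

-- Invariant of A's fold: the state holds (second-lowest, lowest) of the processed prefix p.
def pvInv (p : List Int) (st : Option Int × Option Int) : Prop :=
  match st with
  | (none, none) => p = []
  | (none, some a) => p = [a]
  | (some _, none) => False
  | (some b, some a) => a ≤ b ∧ ∃ r, (a :: b :: r).Perm p ∧ ∀ y ∈ r, b ≤ y

lemma pvInv_step (p : List Int) (st : Option Int × Option Int) (e : Int)
    (h : pvInv p st) : pvInv (p ++ [e]) (pvAStep st e) := by
  obtain ⟨s0, s1⟩ := st
  match s0, s1 with
  | none, none =>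
    simp [pvInv] at h; subst h; simp [pvAStep, pvInv]
  | none, some a =>
    simp [pvInv] at h; subst h
    by_cases hae : a > e
    · simp only [pvAStep, hae, if_pos]
      exact ⟨le_of_lt hae, [], List.Perm.swap a e [], by simp⟩
    · simp only [pvAStep, hae, if_false]
      exact ⟨by omega, [], by exact List.Perm.refl _, by simp⟩
  | some b, none => simp [pvInv] at h
  | some b, some a =>
    obtain ⟨hab, r, hperm, hbd⟩ := h
    by_cases hae : a > e
    · simp only [pvAStep, hae, if_pos]
      refine ⟨le_of_lt hae, b :: r, ?_, ?_⟩
      · exact (hperm.cons e).trans (List.perm_append_singleton e p).symm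
      · intro y hy
        rcases List.mem_cons.mp hy with h1 | h1
        · omega
        · exact le_trans hab (hbd y h1)
    · by_cases hbe : b > e
      · simp only [pvAStep, hae, if_false, hbe, if_pos]
        refine ⟨by omega, b :: r, ?_, ?_⟩
        · exact ((List.Perm.swap e a (b :: r)).trans (hperm.cons e)).trans
            (List.perm_append_singleton e p).symm
        · intro y hy
          rcases List.mem_cons.mp hy with h1 | h1
          · omega
          · exact le_trans (le_of_lt hbe) (hbd y h1)
      · simp only [pvAStep, hae, hbe, if_false]
        refine ⟨hab, r ++ [e], ?_, ?_⟩
        · have h1 : (a :: b :: (r ++ [e])).Perm ((a :: b :: r) ++ [e]) := by simp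
          exact h1.trans (hperm.append_right [e])
        · intro y hy
          rcases List.mem_append.mp hy with h1 | h1
          · exact hbd y h1
          · simp at h1; omega

lemma pvInv_foldl (l : List Int) : ∀ (p : List Int) (st : Option Int × Option Int),
    pvInv p st → pvInv (p ++ l) (l.foldl pvAStep st) := by
  induction l with
  | nil => intro p st h; simpa using h
  | cons x t ih =>
    intro p st h
    have := ih (p ++ [x]) (pvAStep st x) (pvInv_step p st x h)
    simpa [List.append_assoc] using this

-- ===== VERDICT (by name: the statement is the Claim_ definition above) =====
theorem getLowestOfTwoProduct_spec : Claim_equal_getLowestOfTwoProduct := by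
  intro l _ hpre
  unfold Spec_getLowestOfTwoProduct getLowestOfTwoProduct getLowestOfTwoProduct_alt
  have hinv : pvInv l (l.foldl pvAStep (none, none)) := by
    simpa using pvInv_foldl l [] (none, none) (by simp [pvInv])
  unfold Pre_getLowestOfTwoProduct at hpre
  -- the sorted list has at least two elements
  have hlen : 2 ≤ (PySem.List.sorted l (fun x => x) false).length := by
    rw [PySem.List.length_sorted]; exact hpre
  obtain ⟨c, d, rest, hs⟩ : ∃ c d rest,
      PySem.List.sorted l (fun x => x) false = c :: d :: rest := by
    match hsv : PySem.List.sorted l (fun x => x) false with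
    | [] => rw [hsv] at hlen; simp at hlen
    | [x] => rw [hsv] at hlen; simp at hlen
    | c :: d :: rest => exact ⟨c, d, rest, rfl⟩
  have hp2 : (c :: d :: rest).Perm l := hs ▸ PySem.List.sorted_perm l (fun x => x) false
  have hpw : (c :: d :: rest).Pairwise (fun x y => x ≤ y) := by
    have := PySem.List.sorted_pairwise (xs := l) (key := fun x => x)
    rwa [hs] at this
  obtain ⟨hc, hpw2⟩ := List.pairwise_cons.mp hpw
  obtain ⟨hd, -⟩ := List.pairwise_cons.mp hpw2
  -- the fold state must be (some b, some a)
  match hst : l.foldl pvAStep ((none : Option Int), (none : Option Int)) with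
  | (none, none) =>
    rw [hst] at hinv; simp only [pvInv] at hinv; subst hinv; simp at hpre
  | (none, some a) =>
    rw [hst] at hinv; simp only [pvInv] at hinv; subst hinv; simp at hpre
  | (some b, none) => rw [hst] at hinv; simp only [pvInv] at hinv
  | (some b, some a) =>
    rw [hst] at hinv
    obtain ⟨hab, r, hperm, hbd⟩ := hinv
    -- a = c
    have hamem : a ∈ l := hperm.mem_iff.mp (by simp)
    have hcmem : c ∈ l := hp2.mem_iff.mp (by simp)
    have hamin : ∀ y ∈ l, a ≤ y := by
      intro y hy
      rcases List.mem_cons.mp (hperm.mem_iff.mpr hy) with h1 | h1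
      · omega
      rcases List.mem_cons.mp h1 with h2 | h2
      · omega
      · exact le_trans hab (hbd y h2)
    have hcmin : ∀ y ∈ l, c ≤ y := by
      intro y hy
      rcases List.mem_cons.mp (hp2.mem_iff.mpr hy) with h1 | h1
      · omega
      rcases List.mem_cons.mp h1 with h2 | h2
      · exact h2 ▸ hc d (by simp)
      · exact hc y (List.mem_cons_of_mem _ h2)
    have hac : a = c := le_antisymm (hamin c hcmem) (hcmin a hamem)
    subst hac
    -- b = d : cancel the common head
    have htail : (b :: r).Perm (d :: rest) := (hperm.trans hp2.symm).cons_inv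
    have hbd' : b = d := by
      have hdmem : d ∈ b :: r := htail.mem_iff.mpr (by simp)
      have hbmem : b ∈ d :: rest := htail.mem_iff.mp (by simp)
      have hdb : d ≤ b := by
        rcases List.mem_cons.mp hbmem with h1 | h1
        · omega
        · exact hd b h1
      have hbdle : b ≤ d := by
        rcases List.mem_cons.mp hdmem with h1 | h1
        · omega
        · exact hbd d h1
      omega
    subst hbd'
    rw [hs]
    have h0 : (0:Int) ≤ (rest.length:Int) + 1 := by positivity
    simp [PySem.List.pyGet?, PySem.List.pyIdx?, h0, mul_comm]
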